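-- pv_equiv track=rewrite | github.com/DavidDuncker/FultonCountyBallotScanner | OCR/read_adjudication_data.py | get_locations_of_race_names
-- ===== SOURCE A (Python) =====
-- def get_locations_of_race_names(text, list_of_races):
--     single_line_text = text.replace("\n", "")
--     single_line_text = single_line_text.replace("  ", " ")
--     single_line_text_sanitized = single_line_text.replace("5", "S").replace("0", "O").replace("1", "l").\
--         replace("8", "B").replace("{", "(").replace("}", ")")
--
--     locations_of_race_names = []
--     for race in list_of_races:
--         race_sanitized = race.replace("5", "S").replace("0", "O").replace("1", "l").\
--         replace("8", "B").replace("{", "(").replace("}", ")")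
--         #race_sanitized = ''.join(filter(str.isalnum, race_sanitized))
--         #line_sanitized = ''.join(filter(str.isalnum, line_sanitized))
--         beginning_of_substring = single_line_text_sanitized.find(race_sanitized)
--         if beginning_of_substring == -1:
--             continue
--         end_of_substring = beginning_of_substring+len(race_sanitized)
--         locations_of_race_names.append([beginning_of_substring, end_of_substring])
--
--     return locations_of_race_names
-- ===== SOURCE B (Python) =====
-- def get_locations_of_race_names(text, list_of_races):
--     # One fused pass builds the sanitized text (newline removal + pairwise
--     # double-space collapse + character translation), then a single left-to-right
--     # scan over the text records the leftmost match of every race at once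
--     # (races bucketed by their first character), instead of one find() pass per race.
--     table = str.maketrans("5018{}", "SOlB()")
--     chars = []
--     pending = False
--     for ch in text:
--         if ch == '\n':
--             continue
--         if ch == ' ':
--             if pending:
--                 chars.append(' ')
--                 pending = False
--             else:
--                 pending = True
--         else:
--             if pending:
--                 chars.append(' ')
--                 pending = False
--             chars.append(ch)
--     if pending:
--         chars.append(' ')
--     s = ''.join(chars).translate(table)
--
--     races = [race.translate(table) for race in list_of_races]
--
--     starts = {}
--     for i, r in enumerate(races):
--         if r == "":
--             starts[i] = 0
--     buckets = {}
--     for i, r in enumerate(races):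
--         if r != "":
--             buckets.setdefault(r[0], []).append((i, r))
--
--     for j, ch in enumerate(s):
--         for i, r in buckets.get(ch, ()):
--             if i not in starts and s.startswith(r, j):
--                 starts[i] = j
--
--     return [[starts[i], starts[i] + len(r)]
--             for i, r in enumerate(races) if i in starts]
-- ===== Notes on version B (the rewrite author's own statement) =====
-- stated objective: alternative
-- what changed: A builds the sanitized text with eight chained full-string replace passes and then runs one find() pass over the text per race; B builds it in one fused character pass (newline skip, pairwise space collapse, translation table) and finds the leftmost occurrence of all races in a single left-to-right scan of the text, with races bucketed by their first character so each position only tests races that can start there.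
import Mathlib
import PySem

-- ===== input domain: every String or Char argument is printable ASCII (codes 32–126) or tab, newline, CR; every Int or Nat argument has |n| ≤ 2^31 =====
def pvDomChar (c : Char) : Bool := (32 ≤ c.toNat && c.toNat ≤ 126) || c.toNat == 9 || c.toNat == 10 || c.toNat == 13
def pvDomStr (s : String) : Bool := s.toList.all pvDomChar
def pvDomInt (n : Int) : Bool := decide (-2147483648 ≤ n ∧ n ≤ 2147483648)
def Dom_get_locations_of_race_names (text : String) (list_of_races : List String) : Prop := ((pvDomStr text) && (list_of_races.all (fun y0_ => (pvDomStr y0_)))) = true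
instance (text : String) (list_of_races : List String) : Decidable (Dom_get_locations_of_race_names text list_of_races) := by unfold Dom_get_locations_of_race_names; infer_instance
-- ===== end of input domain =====

-- B replaces A's six chained full-string replace passes and one find() pass per race
-- by one fused sanitizing pass plus a single left-to-right scan over the text that
-- records the leftmost match of every race at once (races bucketed by first character);
-- an alternative single-scan algorithm, not measured faster.

-- ===== PORT A =====
def get_locations_of_race_names (text : String) (list_of_races : List String) : List (List Int) :=
  let single_line_text := PySem.Str.replace text "\n" ""
  let single_line_text2 := PySem.Str.replace single_line_text "  " " "
  let single_line_text_sanitized :=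
    PySem.Str.replace (PySem.Str.replace (PySem.Str.replace (PySem.Str.replace (PySem.Str.replace (PySem.Str.replace single_line_text2 "5" "S") "0" "O") "1" "l") "8" "B") "{" "(") "}" ")"
  list_of_races.foldl (fun acc race =>
    let race_sanitized :=
      PySem.Str.replace (PySem.Str.replace (PySem.Str.replace (PySem.Str.replace (PySem.Str.replace (PySem.Str.replace race "5" "S") "0" "O") "1" "l") "8" "B") "{" "(") "}" ")"
    let beginning_of_substring := PySem.Str.find single_line_text_sanitized race_sanitized
    if beginning_of_substring = -1 then acc
    else acc ++ [[beginning_of_substring, beginning_of_substring + PySem.Str.len race_sanitized]]) []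

-- ===== PORT B =====
-- str.maketrans/translate table of Source B as a character function
def pvTr (c : Char) : Char :=
  if c = '5' then 'S' else if c = '0' then 'O' else if c = '1' then 'l'
  else if c = '8' then 'B' else if c = '{' then '(' else if c = '}' then ')' else c

-- the fused per-character loop of Source B (newline skip + pairwise double-space collapse),
-- `pending` is the loop's boolean flag
def pvSan : Bool → List Char → List Char
  | pending, [] => if pending then [' '] else []
  | pending, c :: t =>
    if c = '\n' then pvSan pending t
    else if c = ' ' then
      (if pending then ' ' :: pvSan false t else pvSan true t)
    else
      (if pending then ' ' :: c :: pvSan false t else c :: pvSan false t)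

-- the `starts` seeding loop of Source B (empty races match at 0)
def pvSeed (l : List (Int × List Char)) : PySem.Dict Int Int :=
  l.foldl (fun st ir => if ir.2 = [] then st.insert ir.1 0 else st) PySem.Dict.empty

-- the `buckets` building loop of Source B (setdefault(r[0], []).append((i, r)) = modify)
def pvBuckets (l : List (Int × List Char)) : PySem.Dict Char (List (Int × List Char)) :=
  l.foldl (fun bk ir => match ir.2 with
    | [] => bk
    | c :: _ => bk.modify c [] (· ++ [ir])) PySem.Dict.empty

-- the inner loop body of Source B's scan: at position j with character ch, try every
-- bucketed race; s.startswith(r, j) with j ≥ 0 is a prefix test on s.drop j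
def pvScanStep (s : List Char) (bk : PySem.Dict Char (List (Int × List Char)))
    (d : PySem.Dict Int Int) (jch : Int × Char) : PySem.Dict Int Int :=
  (bk.getD jch.2 []).foldl (fun d ir =>
    if d.contains ir.1 then d
    else if PySem.Chars.startswith (s.drop jch.1.toNat) ir.2 then d.insert ir.1 jch.1 else d) d

def get_locations_of_race_names_alt (text : String) (list_of_races : List String) : List (List Int) :=
  let s : List Char := (pvSan false text.toList).map pvTr
  let races : List (List Char) := list_of_races.map (fun r => r.toList.map pvTr)
  let erac := PySem.List.enumerate races 0
  let starts0 := pvSeed erac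
  let bk := pvBuckets erac
  let d := (PySem.List.enumerate s 0).foldl (pvScanStep s bk) starts0
  erac.filterMap (fun ir => (d.get? ir.1).map (fun j => [j, j + (ir.2.length : Int)]))

-- ===== PRECONDITION & SPEC =====
def Spec_get_locations_of_race_names (text : String) (list_of_races : List String) (out : List (List Int)) : Prop := out = get_locations_of_race_names_alt text list_of_races
instance (text : String) (list_of_races : List String) (out : List (List Int)) : Decidable (Spec_get_locations_of_race_names text list_of_races out) := by unfold Spec_get_locations_of_race_names; infer_instance

-- ===== CLAIM (what is proved, stated in full; the proofs are below) =====
def Claim_equal_get_locations_of_race_names : Prop := ∀ (text : String) (list_of_races : List String), Dom_get_locations_of_race_names text list_of_races → Spec_get_locations_of_race_names text list_of_races (get_locations_of_race_names text list_of_races)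

-- ===== LEMMAS AND PROOFS =====

def pvPend : Bool → List Char → List Char
  | pending, [] => if pending then [' '] else []
  | pending, c :: t =>
    if c = ' ' then (if pending then ' ' :: pvPend false t else pvPend true t)
    else (if pending then ' ' :: c :: pvPend false t else c :: pvPend false t)
lemma go_newline (fuel : Nat) : ∀ (l acc : List Char), l.length ≤ fuel →
    PySem.Chars.replace.go ['\n'] [] fuel l acc = acc.reverse ++ l.filter (fun c => !(c == '\n')) := by
  induction fuel with
  | zero => intro l acc h; interval_cases hl : l.length; simp_all [PySem.Chars.replace.go, List.length_eq_zero_iff.mp hl]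
  | succ f ih =>
    intro l acc h
    cases l with
    | nil => simp [PySem.Chars.replace.go]
    | cons c t =>
      simp only [PySem.Chars.replace.go, List.isPrefixOf, Bool.and_true]
      by_cases hc : c = '\n'
      · subst hc
        simp only [beq_self_eq_true, if_pos, List.length_cons, List.drop_succ_cons, List.length_nil, List.drop_zero,
          List.nil_append, List.reverse_nil]
        rw [ih t acc (by simpa using h)]
        simp
      · rw [if_neg (by simp [Ne.symm hc])]
        rw [ih t (c :: acc) (by simpa using h)]
        simp [hc]
lemma go_single (a b : Char) (fuel : Nat) : ∀ (l acc : List Char), l.length ≤ fuel →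
    PySem.Chars.replace.go [a] [b] fuel l acc = acc.reverse ++ l.map (fun c => if c = a then b else c) := by
  induction fuel with
  | zero => intro l acc h; interval_cases hl : l.length; simp_all [PySem.Chars.replace.go, List.length_eq_zero_iff.mp hl]
  | succ f ih =>
    intro l acc h
    cases l with
    | nil => simp [PySem.Chars.replace.go]
    | cons c t =>
      simp only [PySem.Chars.replace.go, List.isPrefixOf, Bool.and_true]
      by_cases hc : c = a
      · subst hc
        simp only [beq_self_eq_true, if_pos, List.length_cons, List.drop_succ_cons,
          List.length_nil, List.drop_zero]
        have : [b].reverse ++ acc = b :: acc := by simp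
        rw [this, ih t (b :: acc) (by simpa using h)]
        simp
      · rw [if_neg (by simp [Ne.symm hc])]
        rw [ih t (c :: acc) (by simpa using h)]
        simp [hc]
lemma go_ss (fuel : Nat) : ∀ (l acc : List Char), l.length ≤ fuel →
    PySem.Chars.replace.go [' ', ' '] [' '] fuel l acc = acc.reverse ++ pvPend false l := by
  induction fuel with
  | zero => intro l acc h; interval_cases hl : l.length; simp_all [PySem.Chars.replace.go, List.length_eq_zero_iff.mp hl, pvPend]
  | succ f ih =>
    intro l acc h
    cases l with
    | nil => simp [PySem.Chars.replace.go, pvPend]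
    | cons c t =>
      simp only [PySem.Chars.replace.go]
      by_cases hpre : List.isPrefixOf [' ', ' '] (c :: t) = true
      · rw [if_pos hpre]
        obtain ⟨hc, t', ht⟩ : c = ' ' ∧ ∃ t', t = ' ' :: t' := by
          cases t with
          | nil => simp [List.isPrefixOf] at hpre
          | cons c2 t2 =>
            simp only [List.isPrefixOf, Bool.and_true, Bool.and_eq_true, beq_iff_eq] at hpre
            exact ⟨hpre.1.symm, t2, by simp [hpre.2.symm]⟩
        subst hc; subst ht
        have : List.drop [' ', ' '].length (' ' :: ' ' :: t') = t' := by simp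
        rw [this]
        rw [ih t' ([' '].reverse ++ acc) (by simp at h ⊢; omega)]
        simp [pvPend]
      · rw [if_neg hpre]
        rw [ih t (c :: acc) (by simpa using h)]
        -- pvPend false (c :: t) = c :: pvPend false t  when no double-space prefix
        have hstep : pvPend false (c :: t) = c :: pvPend false t := by
          by_cases hc : c = ' '
          · subst hc
            cases t with
            | nil => simp [pvPend]
            | cons c2 t2 =>
              have hc2 : ¬ c2 = ' ' := by
                intro h2; subst h2; simp [List.isPrefixOf] at hpre
              simp [pvPend, hc2]
          · simp [pvPend, hc]
        rw [hstep]
        simp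
lemma replace_newline (l : List Char) :
    PySem.Chars.replace l ['\n'] [] = l.filter (fun c => !(c == '\n')) := by
  rw [PySem.Chars.replace, if_neg (by simp)]
  simpa using go_newline l.length l [] le_rfl
lemma replace_single (l : List Char) (a b : Char) :
    PySem.Chars.replace l [a] [b] = l.map (fun c => if c = a then b else c) := by
  rw [PySem.Chars.replace, if_neg (by simp)]
  simpa using go_single a b l.length l [] le_rfl
lemma replace_ss (l : List Char) :
    PySem.Chars.replace l [' ', ' '] [' '] = pvPend false l := by
  rw [PySem.Chars.replace, if_neg (by simp)]
  simpa using go_ss l.length l [] le_rfl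
lemma chain_eq (l : List Char) :
    PySem.Chars.replace (PySem.Chars.replace (PySem.Chars.replace (PySem.Chars.replace (PySem.Chars.replace (PySem.Chars.replace l ['5'] ['S']) ['0'] ['O']) ['1'] ['l']) ['8'] ['B']) ['{'] ['(']) ['}'] [')'] = l.map pvTr := by
  simp only [replace_single, List.map_map]
  apply List.map_congr_left
  intro c _
  simp only [Function.comp, pvTr]
  by_cases h5 : c = '5'; · subst h5; rfl
  by_cases h0 : c = '0'; · subst h0; rfl
  by_cases h1 : c = '1'; · subst h1; rfl
  by_cases h8 : c = '8'; · subst h8; rfl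
  by_cases hob : c = '{'; · subst hob; rfl
  by_cases hcb : c = '}'; · subst hcb; rfl
  simp [h5, h0, h1, h8, hob, hcb]
lemma pvSan_eq (cs : List Char) : ∀ p, pvSan p cs = pvPend p (cs.filter (fun c => !(c == '\n'))) := by
  induction cs with
  | nil => intro p; rfl
  | cons c t ih =>
    intro p
    by_cases hc : c = '\n'
    · subst hc; simp [pvSan, ih]
    · simp only [pvSan, if_neg hc, List.filter_cons, show (!(c == '\n')) = true by simp [hc], ih,
        if_true]
      rfl
lemma seed_fold_get?_not (l : List (Int × List Char)) : ∀ (st : PySem.Dict Int Int) (i : Int),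
    (∀ p ∈ l, p.1 ≠ i) →
    (l.foldl (fun st ir => if ir.2 = [] then st.insert ir.1 0 else st) st).get? i = st.get? i := by
  induction l with
  | nil => intro st i _; rfl
  | cons ir l ih =>
    intro st i hne
    simp only [List.foldl_cons]
    rw [ih _ i (fun p hp => hne p (List.mem_cons_of_mem _ hp))]
    split_ifs
    · rw [PySem.Dict.get?_insert_of_ne _ _ (Ne.symm (hne ir (List.mem_cons_self)))]
    · rfl
lemma seed_fold_get?_mem (l : List (Int × List Char)) : ∀ (st : PySem.Dict Int Int) (i : Int) (r : List Char),
    (l.map (·.1)).Nodup → (i, r) ∈ l → st.get? i = none →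
    (l.foldl (fun st ir => if ir.2 = [] then st.insert ir.1 0 else st) st).get? i =
      if r = [] then some 0 else none := by
  induction l with
  | nil => intro _ _ _ _ h; simp at h
  | cons ir l ih =>
    intro st i r hnd hmem hst
    simp only [List.map_cons, List.nodup_cons] at hnd
    rcases List.mem_cons.mp hmem with heq | htail
    · subst heq
      simp only [List.foldl_cons]
      have hnot : ∀ p ∈ l, p.1 ≠ i := by
        intro p hp hpi
        exact hnd.1 (by simpa [hpi] using List.mem_map_of_mem (f := (·.1)) hp)
      rw [seed_fold_get?_not l _ i hnot]
      split_ifs with hr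
      · exact PySem.Dict.get?_insert_self _ _ _
      · exact hst
    · simp only [List.foldl_cons]
      have hii : ir.1 ≠ i := by
        intro hpi
        exact hnd.1 (by simpa [hpi] using List.mem_map_of_mem (f := (·.1)) htail)
      refine ih _ i r hnd.2 htail ?_
      split_ifs
      · rw [PySem.Dict.get?_insert_of_ne _ _ (Ne.symm hii)]; exact hst
      · exact hst

lemma bucket_fold_getD (l : List (Int × List Char)) :
    ∀ (bk : PySem.Dict Char (List (Int × List Char))) (c : Char),
    ((l.foldl (fun bk ir => match ir.2 with
      | [] => bk
      | c :: _ => bk.modify c [] (· ++ [ir])) bk).getD c []) =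
      bk.getD c [] ++ l.filter (fun ir => ir.2.head? == some c) := by
  induction l with
  | nil => intro bk c; simp
  | cons ir l ih =>
    intro bk c
    obtain ⟨i, r⟩ := ir
    cases r with
    | nil => simp only [List.foldl_cons, ih, List.filter_cons]; simp
    | cons h t =>
      simp only [List.foldl_cons, ih, List.filter_cons, List.head?_cons]
      by_cases hc : h = c
      · subst hc; simp [PySem.Dict.getD_modify_self]
      · rw [PySem.Dict.getD_modify_of_ne]
        · simp [hc]
        · exact Ne.symm hc

-- the inner scan fold leaves keys it never touches alone
lemma inner_fold_get?_not (u : List Char) (j : Int) (l : List (Int × List Char)) :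
    ∀ (d : PySem.Dict Int Int) (i : Int), (∀ p ∈ l, p.1 ≠ i) →
    (l.foldl (fun d ir =>
      if d.contains ir.1 then d
      else if PySem.Chars.startswith u ir.2 then d.insert ir.1 j else d) d).get? i = d.get? i := by
  induction l with
  | nil => intro d i _; rfl
  | cons ir l ih =>
    intro d i hne
    simp only [List.foldl_cons]
    rw [ih _ i (fun p hp => hne p (List.mem_cons_of_mem _ hp))]
    split_ifs
    · rfl
    · rw [PySem.Dict.get?_insert_of_ne _ _ (Ne.symm (hne ir (List.mem_cons_self)))]
    · rfl
lemma inner_fold_get?_mem (u : List Char) (j : Int) (l : List (Int × List Char)) :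
    ∀ (d : PySem.Dict Int Int) (i : Int) (r : List Char),
    (l.map (·.1)).Nodup → (i, r) ∈ l →
    (l.foldl (fun d ir =>
      if d.contains ir.1 then d
      else if PySem.Chars.startswith u ir.2 then d.insert ir.1 j else d) d).get? i =
      if d.get? i = none ∧ PySem.Chars.startswith u r then some j else d.get? i := by
  induction l with
  | nil => intro _ _ _ _ h; simp at h
  | cons ir l ih =>
    intro d i r hnd hmem
    simp only [List.map_cons, List.nodup_cons] at hnd
    rcases List.mem_cons.mp hmem with heq | htail
    · subst heq
      simp only [List.foldl_cons]
      have hnot : ∀ p ∈ l, p.1 ≠ i := by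
        intro p hp hpi
        exact hnd.1 (by simpa [hpi] using List.mem_map_of_mem (f := (·.1)) hp)
      rw [inner_fold_get?_not u j l _ i hnot]
      rw [PySem.Dict.contains_eq_isSome_get?]
      rcases hd : d.get? i with _ | v
      · simp only [Option.isSome_none, Bool.false_eq_true, if_false, true_and]
        split_ifs with hs
        · exact PySem.Dict.get?_insert_self _ _ _
        · exact hd
      · simp [hd]
    · simp only [List.foldl_cons]
      have hii : ir.1 ≠ i := by
        intro hpi
        exact hnd.1 (by simpa [hpi] using List.mem_map_of_mem (f := (·.1)) htail)
      rw [ih _ i r hnd.2 htail]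
      have hsame : ∀ (d' : PySem.Dict Int Int),
          (if d.contains ir.1 then d else if PySem.Chars.startswith u ir.2 then d.insert ir.1 j else d).get? i = d.get? i := by
        intro _
        split_ifs
        · rfl
        · rw [PySem.Dict.get?_insert_of_ne _ _ (Ne.symm hii)]
        · rfl
      rw [hsame d]
lemma enum_fst_nodup {α : Type} (xs : List α) (k : Int) :
    ((PySem.List.enumerate xs k).map (·.1)).Nodup := by
  have h := PySem.List.pairwise_lt_enumerate xs k
  exact (List.pairwise_map.mpr h).imp (fun hlt => ne_of_lt hlt)
lemma enum_snd_unique {α : Type} (xs : List α) (i : Int) (r r' : α)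
    (h1 : (i, r) ∈ PySem.List.enumerate xs 0) (h2 : (i, r') ∈ PySem.List.enumerate xs 0) : r = r' := by
  rw [PySem.List.mem_enumerate_iff] at h1 h2
  obtain ⟨k, hk, hkp⟩ := h1
  obtain ⟨k', hk', hkp'⟩ := h2
  obtain ⟨hi, hr⟩ := Prod.mk.injEq .. ▸ hkp
  obtain ⟨hi', hr'⟩ := Prod.mk.injEq .. ▸ hkp'
  · have : k = k' := by omega
    subst this; rw [hr, hr']
lemma infix_of_prefix_drop {r s : List Char} {j : Nat} (h : r <+: s.drop j) : r <:+: s :=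
  h.isInfix.trans (s.drop_suffix j).isInfix
lemma find_lt_length_of_ne_nil (s r : List Char) (hr : r ≠ []) (hf : 0 ≤ PySem.Chars.find s r) :
    PySem.Chars.find s r < (s.length : Int) := by
  obtain ⟨hpre, -⟩ := PySem.Chars.find_spec hf
  rcases lt_or_ge (PySem.Chars.find s r).toNat s.length with h | h
  · omega
  · rw [List.drop_eq_nil_of_le h] at hpre
    exact absurd (List.prefix_nil.mp hpre) hr
lemma find_eq_j_iff (s r : List Char) (j : Nat)
    (hnot : ¬ (0 ≤ PySem.Chars.find s r ∧ PySem.Chars.find s r < (j : Int))) :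
    (r <+: s.drop j ↔ PySem.Chars.find s r = (j : Int)) := by
  constructor
  · intro hpre
    have hin : 0 ≤ PySem.Chars.find s r := by
      rw [PySem.Chars.find_nonneg_iff]
      exact infix_of_prefix_drop hpre
    obtain ⟨-, hmin⟩ := PySem.Chars.find_spec hin
    have h1 : ¬ (j < (PySem.Chars.find s r).toNat) := fun hlt => hmin j hlt hpre
    omega
  · intro hf
    have hin : 0 ≤ PySem.Chars.find s r := by omega
    obtain ⟨hpre, -⟩ := PySem.Chars.find_spec hin
    have : (PySem.Chars.find s r).toNat = j := by omega
    rwa [this] at hpre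
def pvTarget (s r : List Char) (j : Int) : Option Int :=
  if 0 ≤ PySem.Chars.find s r ∧ (r = [] ∨ PySem.Chars.find s r < j) then some (PySem.Chars.find s r) else none
def pvInv (s : List Char) (rs : List (List Char)) (d : PySem.Dict Int Int) (j : Int) : Prop :=
  ∀ i r, (i, r) ∈ PySem.List.enumerate rs 0 → d.get? i = pvTarget s r j
lemma seed_inv (s : List Char) (rs : List (List Char)) :
    pvInv s rs (pvSeed (PySem.List.enumerate rs 0)) 0 := by
  intro i r hmem
  rw [pvSeed, seed_fold_get?_mem _ _ i r (enum_fst_nodup rs 0) hmem (PySem.Dict.get?_empty i)]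
  rw [pvTarget]
  by_cases hr : r = []
  · subst hr; simp [PySem.Chars.find_nil]
  · simp only [hr, if_false, false_or]
    rw [if_neg (by omega)]
lemma step_inv (s : List Char) (rs : List (List Char)) (d : PySem.Dict Int Int)
    (j : Nat) (ch : Char) (rest : List Char)
    (hdrop : s.drop j = ch :: rest)
    (hinv : pvInv s rs d (j : Int)) :
    pvInv s rs (pvScanStep s (pvBuckets (PySem.List.enumerate rs 0)) d ((j : Int), ch)) ((j : Int) + 1) := by
  intro i r hmem
  have hL : (pvBuckets (PySem.List.enumerate rs 0)).getD ch [] =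
      (PySem.List.enumerate rs 0).filter (fun ir => ir.2.head? == some ch) := by
    rw [pvBuckets, bucket_fold_getD]
    simp
  have htoNat : ((j : Int)).toNat = j := Int.toNat_natCast j
  rw [pvScanStep]
  simp only [hL, htoNat, hdrop]
  have hLnodup : (((PySem.List.enumerate rs 0).filter (fun ir => ir.2.head? == some ch)).map (·.1)).Nodup :=
    (enum_fst_nodup rs 0).sublist (List.filter_sublist.map _)
  by_cases hrnil : r = []
  · -- empty race: never in a bucket, target is `some 0` at every j
    subst hrnil
    have hnot : ∀ p ∈ (PySem.List.enumerate rs 0).filter (fun ir => ir.2.head? == some ch), p.1 ≠ i := by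
      rintro ⟨i', r'⟩ hp hpi
      subst hpi
      have hp' := List.mem_filter.mp hp
      have : r' = [] := enum_snd_unique rs i' r' [] hp'.1 hmem
      subst this
      simp at hp'
    rw [inner_fold_get?_not _ _ _ _ i hnot, hinv i [] hmem]
    rw [pvTarget, pvTarget]
    simp [PySem.Chars.find_nil]
  · obtain ⟨h, t, rfl⟩ : ∃ h t, r = h :: t := by
      cases r with
      | nil => exact absurd rfl hrnil
      | cons h t => exact ⟨h, t, rfl⟩
    by_cases hrch : h = ch
    · -- in the bucket for ch
      subst hrch
      have hmemL : (i, h :: t) ∈ (PySem.List.enumerate rs 0).filter (fun ir => ir.2.head? == some h) :=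
        List.mem_filter.mpr ⟨hmem, by simp⟩
      rw [inner_fold_get?_mem _ _ _ _ i (h :: t) hLnodup hmemL]
      rw [hinv i _ hmem]
      by_cases hold : 0 ≤ PySem.Chars.find s (h :: t) ∧ PySem.Chars.find s (h :: t) < (j : Int)
      · have h1 : pvTarget s (h :: t) (j : Int) = some (PySem.Chars.find s (h :: t)) := by
          rw [pvTarget, if_pos ⟨hold.1, Or.inr hold.2⟩]
        have h2 : pvTarget s (h :: t) ((j : Int) + 1) = some (PySem.Chars.find s (h :: t)) := by
          rw [pvTarget, if_pos ⟨hold.1, Or.inr (by omega)⟩]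
        rw [h1, h2]
        simp
      · have h1 : pvTarget s (h :: t) (j : Int) = none := by
          rw [pvTarget, if_neg]
          rintro ⟨h0, hc | hc⟩
          · exact hrnil hc
          · exact hold ⟨h0, hc⟩
        rw [h1]
        have hiff := find_eq_j_iff s (h :: t) j hold
        rw [hdrop] at hiff
        by_cases hsw : PySem.Chars.startswith (h :: rest) (h :: t) = true
        · rw [if_pos ⟨rfl, hsw⟩]
          have hfj : PySem.Chars.find s (h :: t) = (j : Int) :=
            hiff.mp ((PySem.Chars.startswith_iff _ _).mp hsw)
          rw [pvTarget, if_pos ⟨by omega, Or.inr (by omega)⟩, hfj]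
        · rw [if_neg (by simp [hsw])]
          have hfne : PySem.Chars.find s (h :: t) ≠ (j : Int) := by
            intro hfj
            exact hsw ((PySem.Chars.startswith_iff _ _).mpr (hiff.mpr hfj))
          rw [pvTarget, if_neg]
          rintro ⟨h0, hc | hc⟩
          · exact hrnil hc
          · exact hold ⟨h0, by omega⟩
    · -- not in the bucket for ch: untouched, and find cannot equal j
      have hnot : ∀ p ∈ (PySem.List.enumerate rs 0).filter (fun ir => ir.2.head? == some ch), p.1 ≠ i := by
        rintro ⟨i', r'⟩ hp hpi
        subst hpi
        have hp' := List.mem_filter.mp hp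
        have : r' = h :: t := enum_snd_unique rs i' r' (h :: t) hp'.1 hmem
        subst this
        exact hrch (by simpa using hp'.2)
      rw [inner_fold_get?_not _ _ _ _ i hnot, hinv i _ hmem]
      have hfne : PySem.Chars.find s (h :: t) ≠ (j : Int) := by
        intro hfj
        have h0 : 0 ≤ PySem.Chars.find s (h :: t) := by omega
        obtain ⟨hpre, -⟩ := PySem.Chars.find_spec h0
        have hj : (PySem.Chars.find s (h :: t)).toNat = j := by omega
        rw [hj, hdrop] at hpre
        exact hrch (List.cons_prefix_cons.mp hpre).1
      rw [pvTarget, pvTarget]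
      by_cases hcase : 0 ≤ PySem.Chars.find s (h :: t) ∧ (h :: t = [] ∨ PySem.Chars.find s (h :: t) < (j : Int))
      · rw [if_pos hcase, if_pos ⟨hcase.1, by
          rcases hcase.2 with hc | hc
          · exact Or.inl hc
          · exact Or.inr (by omega)⟩]
      · rw [if_neg hcase, if_neg]
        rintro ⟨h0, hc | hc⟩
        · exact hcase ⟨h0, Or.inl hc⟩
        · exact hcase ⟨h0, Or.inr (by omega)⟩
lemma pvTarget_stable (s r : List Char) (j : Int) (hj : (s.length : Int) ≤ j) :
    pvTarget s r j = pvTarget s r (s.length : Int) := by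
  rw [pvTarget, pvTarget]
  by_cases hr : r = []
  · simp [hr]
  · simp only [hr, false_or]
    by_cases h0 : 0 ≤ PySem.Chars.find s r
    · have := find_lt_length_of_ne_nil s r hr h0
      rw [if_pos ⟨h0, by omega⟩, if_pos ⟨h0, by omega⟩]
    · rw [if_neg (by omega), if_neg (by omega)]
lemma scan_drop (s : List Char) (rs : List (List Char)) :
    ∀ (t : List Char) (k : Nat) (d : PySem.Dict Int Int), s.drop k = t → pvInv s rs d (k : Int) →
    pvInv s rs ((PySem.List.enumerate t (k : Int)).foldl
      (pvScanStep s (pvBuckets (PySem.List.enumerate rs 0))) d) (s.length : Int) := by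
  intro t
  induction t with
  | nil =>
    intro k d hdrop hinv
    have hk : s.length ≤ k := by
      have := List.drop_eq_nil_iff.mp hdrop
      omega
    intro i r hmem
    rw [PySem.List.enumerate, List.foldl_nil] at *
    rw [hinv i r hmem, pvTarget_stable s r _ (by omega)]
  | cons ch t ih =>
    intro k d hdrop hinv
    rw [PySem.List.enumerate_cons, List.foldl_cons]
    have hstep := step_inv s rs d k ch t hdrop hinv
    have hdrop' : s.drop (k + 1) = t := by
      rw [← List.drop_drop]  -- drop 1 (drop k s)
      rw [hdrop]
      rfl
    have := ih (k + 1) _ hdrop' (by push_cast; exact hstep)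
    rw [show ((k : Int) + 1) = ((k + 1 : Nat) : Int) by push_cast; ring] at *
    exact this
lemma scan_final (s : List Char) (rs : List (List Char)) :
    ∀ i r, (i, r) ∈ PySem.List.enumerate rs 0 →
    ((PySem.List.enumerate s 0).foldl (pvScanStep s (pvBuckets (PySem.List.enumerate rs 0)))
      (pvSeed (PySem.List.enumerate rs 0))).get? i =
      (if PySem.Chars.find s r = -1 then none else some (PySem.Chars.find s r)) := by
  intro i r hmem
  have h0 : pvInv s rs (pvSeed (PySem.List.enumerate rs 0)) ((0 : Nat) : Int) := seed_inv s rs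
  have := scan_drop s rs s 0 _ rfl h0
  rw [show ((0 : Nat) : Int) = 0 by rfl] at this
  rw [this i r hmem, pvTarget]
  have hge := PySem.Chars.neg_one_le_find s r
  by_cases hr : r = []
  · subst hr
    simp [PySem.Chars.find_nil]
  · have hlt : 0 ≤ PySem.Chars.find s r → PySem.Chars.find s r < (s.length : Int) :=
      find_lt_length_of_ne_nil s r hr
    by_cases h0f : 0 ≤ PySem.Chars.find s r
    · rw [if_pos ⟨h0f, Or.inr (hlt h0f)⟩, if_neg (by omega)]
    · rw [if_neg (by omega), if_pos (by omega)]

lemma chainS_toList (u : String) :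
    (PySem.Str.replace (PySem.Str.replace (PySem.Str.replace (PySem.Str.replace (PySem.Str.replace (PySem.Str.replace u "5" "S") "0" "O") "1" "l") "8" "B") "{" "(") "}" ")").toList
      = u.toList.map pvTr := by
  simp only [PySem.Str.toList_replace]
  exact chain_eq u.toList

lemma textPrep_toList (text : String) :
    (PySem.Str.replace (PySem.Str.replace text "\n" "") "  " " ").toList
      = pvSan false text.toList := by
  simp only [PySem.Str.toList_replace]
  rw [show ("\n" : String).toList = ['\n'] from rfl, show ("" : String).toList = [] from rfl,
    show ("  " : String).toList = [' ', ' '] from rfl, show (" " : String).toList = [' '] from rfl]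
  rw [replace_newline, replace_ss, pvSan_eq]
theorem main_eq (text : String) (list_of_races : List String) :
    get_locations_of_race_names text list_of_races = get_locations_of_race_names_alt text list_of_races := by
  simp only [get_locations_of_race_names, get_locations_of_race_names_alt]
  have hs : (PySem.Str.replace (PySem.Str.replace (PySem.Str.replace (PySem.Str.replace (PySem.Str.replace (PySem.Str.replace (PySem.Str.replace (PySem.Str.replace text "\n" "") "  " " ") "5" "S") "0" "O") "1" "l") "8" "B") "{" "(") "}" ")").toList
      = (pvSan false text.toList).map pvTr := by
    rw [chainS_toList, textPrep_toList]
  set s : List Char := (pvSan false text.toList).map pvTr with hsdef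
  set rs : List (List Char) := list_of_races.map (fun r => r.toList.map pvTr) with hrsdef
  -- the common per-race contribution
  set G : List Char → Option (List Int) := fun r =>
    if PySem.Chars.find s r = -1 then none
    else some [PySem.Chars.find s r, PySem.Chars.find s r + (r.length : Int)] with hGdef
  -- B side: the scan dictionary realises first occurrences
  have hB : (PySem.List.enumerate rs 0).filterMap (fun ir =>
      (((PySem.List.enumerate s 0).foldl (pvScanStep s (pvBuckets (PySem.List.enumerate rs 0)))
        (pvSeed (PySem.List.enumerate rs 0))).get? ir.1).map (fun j => [j, j + (ir.2.length : Int)]))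
      = list_of_races.filterMap (fun race => G (race.toList.map pvTr)) := by
    rw [List.filterMap_congr (g := fun ir => G ir.2) ?_]
    · conv_rhs => rw [show list_of_races.filterMap (fun race => G (race.toList.map pvTr))
        = rs.filterMap G by rw [hrsdef, List.filterMap_map]; rfl]
      conv_rhs => rw [show rs = (PySem.List.enumerate rs 0).map (·.2) from (PySem.List.map_snd_enumerate rs 0).symm]
      rw [List.filterMap_map]
      rfl
    · rintro ⟨i, r⟩ hmem
      rw [scan_final s rs i r hmem]
      rw [hGdef]
      by_cases hf : PySem.Chars.find s r = -1
      · simp [hf]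
      · simp [hf]
  rw [hB]
  clear hB hrsdef rs
  -- A side: the foldl is a filterMap
  have hA : list_of_races.foldl (fun acc race =>
      if PySem.Str.find (PySem.Str.replace (PySem.Str.replace (PySem.Str.replace (PySem.Str.replace (PySem.Str.replace (PySem.Str.replace (PySem.Str.replace (PySem.Str.replace text "\n" "") "  " " ") "5" "S") "0" "O") "1" "l") "8" "B") "{" "(") "}" ")")
          (PySem.Str.replace (PySem.Str.replace (PySem.Str.replace (PySem.Str.replace (PySem.Str.replace (PySem.Str.replace race "5" "S") "0" "O") "1" "l") "8" "B") "{" "(") "}" ")") = -1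
      then acc
      else acc ++ [[PySem.Str.find (PySem.Str.replace (PySem.Str.replace (PySem.Str.replace (PySem.Str.replace (PySem.Str.replace (PySem.Str.replace (PySem.Str.replace (PySem.Str.replace text "\n" "") "  " " ") "5" "S") "0" "O") "1" "l") "8" "B") "{" "(") "}" ")")
          (PySem.Str.replace (PySem.Str.replace (PySem.Str.replace (PySem.Str.replace (PySem.Str.replace (PySem.Str.replace race "5" "S") "0" "O") "1" "l") "8" "B") "{" "(") "}" ")"),
        PySem.Str.find (PySem.Str.replace (PySem.Str.replace (PySem.Str.replace (PySem.Str.replace (PySem.Str.replace (PySem.Str.replace (PySem.Str.replace (PySem.Str.replace text "\n" "") "  " " ") "5" "S") "0" "O") "1" "l") "8" "B") "{" "(") "}" ")")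
          (PySem.Str.replace (PySem.Str.replace (PySem.Str.replace (PySem.Str.replace (PySem.Str.replace (PySem.Str.replace race "5" "S") "0" "O") "1" "l") "8" "B") "{" "(") "}" ")")
        + PySem.Str.len (PySem.Str.replace (PySem.Str.replace (PySem.Str.replace (PySem.Str.replace (PySem.Str.replace (PySem.Str.replace race "5" "S") "0" "O") "1" "l") "8" "B") "{" "(") "}" ")")]]) []
      = list_of_races.filterMap (fun race => G (race.toList.map pvTr)) := by
    have hstep : ∀ (acc : List (List Int)) (race : String),
        (if PySem.Str.find (PySem.Str.replace (PySem.Str.replace (PySem.Str.replace (PySem.Str.replace (PySem.Str.replace (PySem.Str.replace (PySem.Str.replace (PySem.Str.replace text "\n" "") "  " " ") "5" "S") "0" "O") "1" "l") "8" "B") "{" "(") "}" ")")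
            (PySem.Str.replace (PySem.Str.replace (PySem.Str.replace (PySem.Str.replace (PySem.Str.replace (PySem.Str.replace race "5" "S") "0" "O") "1" "l") "8" "B") "{" "(") "}" ")") = -1
         then acc
         else acc ++ [[PySem.Str.find (PySem.Str.replace (PySem.Str.replace (PySem.Str.replace (PySem.Str.replace (PySem.Str.replace (PySem.Str.replace (PySem.Str.replace (PySem.Str.replace text "\n" "") "  " " ") "5" "S") "0" "O") "1" "l") "8" "B") "{" "(") "}" ")")
            (PySem.Str.replace (PySem.Str.replace (PySem.Str.replace (PySem.Str.replace (PySem.Str.replace (PySem.Str.replace race "5" "S") "0" "O") "1" "l") "8" "B") "{" "(") "}" ")"),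
          PySem.Str.find (PySem.Str.replace (PySem.Str.replace (PySem.Str.replace (PySem.Str.replace (PySem.Str.replace (PySem.Str.replace (PySem.Str.replace (PySem.Str.replace text "\n" "") "  " " ") "5" "S") "0" "O") "1" "l") "8" "B") "{" "(") "}" ")")
            (PySem.Str.replace (PySem.Str.replace (PySem.Str.replace (PySem.Str.replace (PySem.Str.replace (PySem.Str.replace race "5" "S") "0" "O") "1" "l") "8" "B") "{" "(") "}" ")")
          + PySem.Str.len (PySem.Str.replace (PySem.Str.replace (PySem.Str.replace (PySem.Str.replace (PySem.Str.replace (PySem.Str.replace race "5" "S") "0" "O") "1" "l") "8" "B") "{" "(") "}" ")")]])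
        = (match G (race.toList.map pvTr) with
           | some out => acc ++ [out]
           | none => acc) := by
      intro acc race
      have hfind : PySem.Str.find (PySem.Str.replace (PySem.Str.replace (PySem.Str.replace (PySem.Str.replace (PySem.Str.replace (PySem.Str.replace (PySem.Str.replace (PySem.Str.replace text "\n" "") "  " " ") "5" "S") "0" "O") "1" "l") "8" "B") "{" "(") "}" ")")
          (PySem.Str.replace (PySem.Str.replace (PySem.Str.replace (PySem.Str.replace (PySem.Str.replace (PySem.Str.replace race "5" "S") "0" "O") "1" "l") "8" "B") "{" "(") "}" ")")
          = PySem.Chars.find s (race.toList.map pvTr) := by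
        rw [PySem.Str.find_eq, hs, chainS_toList]
      have hlen : PySem.Str.len (PySem.Str.replace (PySem.Str.replace (PySem.Str.replace (PySem.Str.replace (PySem.Str.replace (PySem.Str.replace race "5" "S") "0" "O") "1" "l") "8" "B") "{" "(") "}" ")")
          = ((race.toList.map pvTr).length : Int) := by
        rw [PySem.Str.len_eq, chainS_toList]
      rw [hfind, hlen, hGdef]
      by_cases hf : PySem.Chars.find s (race.toList.map pvTr) = -1
      · simp [hf]
      · simp [hf]
    induction list_of_races using List.reverseRecOn with
    | nil => rfl
    | append_singleton l race ih =>
      rw [List.foldl_append, List.foldl_cons, List.foldl_nil, List.filterMap_append, ih]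
      rw [hstep]
      rcases hcase : G (race.toList.map pvTr) with _ | out
      · simp [hcase]
      · simp [hcase]
  rw [hA]

-- ===== VERDICT (by name: the statement is the Claim_ definition above) =====
theorem get_locations_of_race_names_spec : Claim_equal_get_locations_of_race_names := by
  intro text list_of_races _
  exact main_eq text list_of_races
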